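-- pv_equiv track=rewrite | github.com/Aochong-Li/perturb-r | utils/chunk_r.py | min_chunk_deprecated
-- ===== SOURCE A (Python) =====
-- def min_chunk_deprecated(reasoning: str, granularity: int = 30):
--     """
--     Chunk the reasoning into smaller chunks.
--     """
--     chunks = reasoning.split('\n\n')
--     masks = [len(chunk.split()) > granularity for chunk in chunks]
--
--     # Step 1: chunk the sequence into small chunks
--     merged, buffer = [], []
--     for c, m in zip(chunks, masks):
--         if not m:
--             buffer.append(c)
--         else:
--             if buffer:
--                 merged.append('\n\n'.join(buffer))
--                 buffer.clear()
--             merged.append(c)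
--     if buffer:
--         merged.append('\n\n'.join(buffer))
--
--     # Step 2: merge small chunks to big chunks
--     super_chunks, current = [], None
--     for c in merged:
--         if len(c.split()) > granularity:
--             if current is not None:
--                 super_chunks.append(current)
--             current = c
--         else:
--             if current is None:
--                 current = c
--             else:
--                 current += '\n\n' + c
--
--     if current is not None:
--         super_chunks.append(current)
--
--     return super_chunks
-- ===== SOURCE B (Python) =====
-- def min_chunk_deprecated(reasoning: str, granularity: int = 30):
--     """
--     Chunk the reasoning into smaller chunks.
--     """
--     super_chunks = []
--     current = None
--     buffer = []
--
--     def absorb(piece):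
--         # pass-2 step: big pieces become a new super-chunk, small ones extend the current one
--         nonlocal current
--         if len(piece.split()) > granularity:
--             if current is not None:
--                 super_chunks.append(current)
--             current = piece
--         else:
--             if current is None:
--                 current = piece
--             else:
--                 current += '\n\n' + piece
--
--     for chunk in reasoning.split('\n\n'):
--         if len(chunk.split()) > granularity:
--             if buffer:
--                 absorb('\n\n'.join(buffer))
--                 buffer = []
--             absorb(chunk)
--         else:
--             buffer.append(chunk)
--
--     if buffer:
--         absorb('\n\n'.join(buffer))
--     if current is not None:
--         super_chunks.append(current)
--     return super_chunks
-- ===== Notes on version B (the rewrite author's own statement) =====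
-- stated objective: simpler
-- what changed: Replaces A's two passes (first materialise the intermediate `merged` list of coalesced small-runs, then fold it into super-chunks) by a single pass over the paragraphs that absorbs each finished small-run or big chunk into the super-chunk accumulator on the fly, never building `merged` or the mask list.
import Mathlib
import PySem

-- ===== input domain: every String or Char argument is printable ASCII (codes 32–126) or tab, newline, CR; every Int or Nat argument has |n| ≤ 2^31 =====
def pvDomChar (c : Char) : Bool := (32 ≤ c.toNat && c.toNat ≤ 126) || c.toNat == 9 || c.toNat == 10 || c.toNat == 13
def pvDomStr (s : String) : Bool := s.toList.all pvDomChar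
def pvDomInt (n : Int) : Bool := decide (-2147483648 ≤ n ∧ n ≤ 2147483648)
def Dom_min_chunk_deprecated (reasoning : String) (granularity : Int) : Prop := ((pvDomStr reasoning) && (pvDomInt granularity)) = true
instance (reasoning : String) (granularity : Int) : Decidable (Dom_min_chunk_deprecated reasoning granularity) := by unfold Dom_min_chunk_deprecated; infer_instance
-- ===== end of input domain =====

-- B replaces A's two passes (build the `merged` list, then fold it into super-chunks) by a
-- single pass that absorbs each finished small-run / big chunk directly; objective: simpler.

-- ===== PORT A =====
-- literal transliteration of A: split, mask list, pass 1 builds `merged`, pass 2 builds `super_chunks`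
def min_chunk_deprecated (reasoning : String) (granularity : Int) : List String :=
  let chunks := (PySem.Str.split? reasoning "\n\n").getD []   -- sep is the literal "\n\n" ≠ "", so split? is always `some`
  let masks := chunks.map (fun chunk => decide (((PySem.Str.split₀ chunk).length : Int) > granularity))
  let p1 := (chunks.zip masks).foldl
    (fun (st : List String × List String) cm =>
      if cm.2 = false then (st.1, st.2 ++ [cm.1])
      else if st.2 ≠ [] then (st.1 ++ [PySem.Str.join "\n\n" st.2] ++ [cm.1], [])
      else (st.1 ++ [cm.1], []))
    ([], [])
  let merged := if p1.2 ≠ [] then p1.1 ++ [PySem.Str.join "\n\n" p1.2] else p1.1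
  let p2 := merged.foldl
    (fun (st : List String × Option String) c =>
      if ((PySem.Str.split₀ c).length : Int) > granularity then
        ((match st.2 with | some cur => st.1 ++ [cur] | none => st.1), some c)
      else
        match st.2 with
        | none => (st.1, some c)
        | some cur => (st.1, some (cur ++ "\n\n" ++ c)))
    ([], none)
  match p2.2 with
  | some cur => p2.1 ++ [cur]
  | none => p2.1

-- ===== PORT B =====
-- B-side helper: Source B's `absorb` (the pass-2 step applied on the fly)
def pvAbsorb (granularity : Int) (st : List String × Option String) (piece : String) : List String × Option String :=
  if ((PySem.Str.split₀ piece).length : Int) > granularity then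
    ((match st.2 with | some cur => st.1 ++ [cur] | none => st.1), some piece)
  else
    match st.2 with
    | none => (st.1, some piece)
    | some cur => (st.1, some (cur ++ "\n\n" ++ piece))

-- B-side helper: Source B's `if buffer: absorb('\n\n'.join(buffer))`
def pvRunEnd (granularity : Int) (sc : List String × Option String) (buf : List String) : List String × Option String :=
  if buf ≠ [] then pvAbsorb granularity sc (PySem.Str.join "\n\n" buf) else sc

-- B-side helper: the body of Source B's single loop
def pvBstep (granularity : Int) (st : (List String × Option String) × List String) (c : String) :
    (List String × Option String) × List String :=
  if ((PySem.Str.split₀ c).length : Int) > granularity then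
    (pvAbsorb granularity (pvRunEnd granularity st.1 st.2) c, [])
  else (st.1, st.2 ++ [c])

def min_chunk_deprecated_alt (reasoning : String) (granularity : Int) : List String :=
  let chunks := (PySem.Str.split? reasoning "\n\n").getD []
  let q := chunks.foldl (pvBstep granularity) (([], none), [])
  let sc := pvRunEnd granularity q.1 q.2
  match sc.2 with
  | some cur => sc.1 ++ [cur]
  | none => sc.1

-- ===== PRECONDITION & SPEC =====
def Spec_min_chunk_deprecated (reasoning : String) (granularity : Int) (out : List String) : Prop := out = min_chunk_deprecated_alt reasoning granularity
instance (reasoning : String) (granularity : Int) (out : List String) : Decidable (Spec_min_chunk_deprecated reasoning granularity out) := by unfold Spec_min_chunk_deprecated; infer_instance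

-- ===== CLAIM (what is proved, stated in full; the proofs are below) =====
def Claim_equal_min_chunk_deprecated : Prop := ∀ (reasoning : String) (granularity : Int), Dom_min_chunk_deprecated reasoning granularity → Spec_min_chunk_deprecated reasoning granularity (min_chunk_deprecated reasoning granularity)

-- ===== LEMMAS AND PROOFS =====

-- zipping a list with its own map (A's `zip(chunks, masks)`)
lemma pvZipSelf {α β : Type} (l : List α) (f : α → β) :
    l.zip (l.map f) = l.map (fun a => (a, f a)) := by
  induction l with
  | nil => simp
  | cons a l ih => simp [ih]

-- A's pass-1 step, after the zip with the mask list is eliminated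
def pvStep1 (g : Int) (st : List String × List String) (c : String) : List String × List String :=
  if (decide (((PySem.Str.split₀ c).length : Int) > g)) = false then (st.1, st.2 ++ [c])
  else if st.2 ≠ [] then (st.1 ++ [PySem.Str.join "\n\n" st.2] ++ [c], [])
  else (st.1 ++ [c], [])

-- A's flush of the trailing buffer into `merged`
def pvFin1 (p : List String × List String) : List String :=
  if p.2 ≠ [] then p.1 ++ [PySem.Str.join "\n\n" p.2] else p.1

-- the final `super_chunks` flush shared by both ports' shapes
def pvFin2 (p : List String × Option String) : List String :=
  match p.2 with
  | some cur => p.1 ++ [cur]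
  | none => p.1

-- A's `merged` list, computed recursively from a pending buffer
def pvMerged (g : Int) : List String → List String → List String
  | [], buf => if buf ≠ [] then [PySem.Str.join "\n\n" buf] else []
  | c :: rest, buf =>
    if ((PySem.Str.split₀ c).length : Int) > g then
      (if buf ≠ [] then [PySem.Str.join "\n\n" buf] else []) ++ c :: pvMerged g rest []
    else pvMerged g rest (buf ++ [c])

lemma pvMergedA (g : Int) (chunks : List String) : ∀ (m buf : List String),
    pvFin1 (chunks.foldl (pvStep1 g) (m, buf)) = m ++ pvMerged g chunks buf := by
  induction chunks with
  | nil =>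
    intro m buf
    by_cases h : buf = [] <;> simp [pvFin1, pvMerged, h]
  | cons c rest ih =>
    intro m buf
    by_cases h : ((PySem.Str.split₀ c).length : Int) > g
    · by_cases hb : buf = [] <;>
        simp [pvStep1, pvMerged, h, hb, ih, List.append_assoc]
    · simp [pvStep1, pvMerged, h, ih]

-- B's single pass, finished with the trailing-run flush, equals A's pass 2 over `merged`
lemma pvLinv (g : Int) (chunks : List String) : ∀ (sc : List String × Option String) (buf : List String),
    pvRunEnd g (chunks.foldl (pvBstep g) (sc, buf)).1 (chunks.foldl (pvBstep g) (sc, buf)).2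
    = (pvMerged g chunks buf).foldl (pvAbsorb g) sc := by
  induction chunks with
  | nil =>
    intro sc buf
    by_cases h : buf = [] <;> simp [pvMerged, pvRunEnd, h]
  | cons c rest ih =>
    intro sc buf
    by_cases h : ((PySem.Str.split₀ c).length : Int) > g
    · have h1 := ih (pvAbsorb g (pvRunEnd g sc buf) c) []
      by_cases hb : buf = [] <;>
        simp [pvBstep, pvMerged, pvRunEnd, h, hb] at h1 ⊢ <;>
        exact h1
    · simp [pvBstep, pvMerged, h, ih]

lemma pvAchar (reasoning : String) (g : Int) :
    min_chunk_deprecated reasoning g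
    = pvFin2 ((pvMerged g ((PySem.Str.split? reasoning "\n\n").getD []) []).foldl (pvAbsorb g) ([], none)) := by
  unfold min_chunk_deprecated
  simp only [pvZipSelf, List.foldl_map]
  trans pvFin2 ((pvFin1 (((PySem.Str.split? reasoning "\n\n").getD []).foldl (pvStep1 g) ([], []))).foldl
    (pvAbsorb g) ([], none))
  · rfl
  · rw [pvMergedA g _ [] []]
    simp

lemma pvBchar (reasoning : String) (g : Int) :
    min_chunk_deprecated_alt reasoning g
    = pvFin2 ((pvMerged g ((PySem.Str.split? reasoning "\n\n").getD []) []).foldl (pvAbsorb g) ([], none)) := by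
  unfold min_chunk_deprecated_alt
  trans pvFin2 (pvRunEnd g
    ((((PySem.Str.split? reasoning "\n\n").getD []).foldl (pvBstep g) (([], none), [])).1)
    ((((PySem.Str.split? reasoning "\n\n").getD []).foldl (pvBstep g) (([], none), [])).2))
  · rfl
  · rw [pvLinv]

-- ===== VERDICT (by name: the statement is the Claim_ definition above) =====
theorem min_chunk_deprecated_spec : Claim_equal_min_chunk_deprecated := by
  unfold Claim_equal_min_chunk_deprecated
  intro reasoning granularity _
  unfold Spec_min_chunk_deprecated
  rw [pvAchar, pvBchar]
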